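-- pv_equiv track=rewrite | github.com/nupsea/luminary | backend/app/workflows/ingestion_nodes/_shared.py | build_entity_tail
-- ===== SOURCE A (Python) =====
-- ENTITY_TAIL_MAX = 12
--
-- def build_entity_tail(canonical_names: set[str] | list[str] | tuple[str, ...]) -> str:
--     """Build the deterministic entity tail '[Entities: A, B, C]' for a chunk.
--
--     Rules per S224 AC: dedupe (case-insensitive on the canonical key), sort
--     alphabetically (case-insensitive), capitalize each label, cap at
--     ENTITY_TAIL_MAX entries. Returns '' for empty input so callers can store
--     NULL when there are no entities.
--     """
--     if not canonical_names:
--         return ""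
--     seen: dict[str, str] = {}
--     for raw in canonical_names:
--         if not isinstance(raw, str):
--             continue
--         name = raw.strip()
--         if not name:
--             continue
--         key = name.casefold()
--         if key not in seen:
--             seen[key] = name
--     if not seen:
--         return ""
--     ordered = sorted(seen.values(), key=lambda s: s.casefold())[:ENTITY_TAIL_MAX]
--     capitalized = [
--         " ".join(part[:1].upper() + part[1:] if part else part for part in label.split(" "))
--         for label in ordered
--     ]
--     return f"[Entities: {', '.join(capitalized)}]"
-- ===== SOURCE B (Python) =====
-- ENTITY_TAIL_MAX = 12
--
-- def build_entity_tail(canonical_names):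
--     names = []
--     for raw in canonical_names:
--         if isinstance(raw, str):
--             name = raw.strip()
--             if name:
--                 names.append(name)
--     if not names:
--         return ""
--     names.sort(key=str.casefold)  # stable: ties keep first-in-input order
--     kept = []
--     prev_key = None
--     for name in names:
--         key = name.casefold()
--         if key != prev_key:
--             kept.append(name)
--             prev_key = key
--     labels = [
--         " ".join(part[:1].upper() + part[1:] if part else part for part in label.split(" "))
--         for label in kept[:ENTITY_TAIL_MAX]
--     ]
--     return "[Entities: " + ", ".join(labels) + "]"
-- ===== Notes on version B (the rewrite author's own statement) =====
-- stated objective: alternative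
-- what changed: Replaces the casefold-keyed dict (dedupe first, then sort its values) by a stable sort of all kept names followed by one linear adjacent-dedup pass tracking only the previous casefold key; stability keeps the first-in-input representative, so the result is identical.
import Mathlib
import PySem

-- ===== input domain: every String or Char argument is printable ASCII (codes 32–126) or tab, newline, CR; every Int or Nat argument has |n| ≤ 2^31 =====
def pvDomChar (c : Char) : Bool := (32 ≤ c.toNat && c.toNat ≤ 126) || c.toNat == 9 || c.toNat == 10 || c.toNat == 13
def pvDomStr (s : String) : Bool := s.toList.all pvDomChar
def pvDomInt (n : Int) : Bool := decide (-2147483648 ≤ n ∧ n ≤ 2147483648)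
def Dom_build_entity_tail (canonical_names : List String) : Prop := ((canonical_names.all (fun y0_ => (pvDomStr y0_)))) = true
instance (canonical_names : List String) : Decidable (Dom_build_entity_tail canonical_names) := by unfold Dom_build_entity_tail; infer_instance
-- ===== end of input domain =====

-- B replaces A's casefold-keyed dict (dedupe, then sort its values) by a stable sort of all
-- kept names followed by one adjacent-dedup pass tracking only the previous key: alternative
-- decomposition, same cost.

-- ===== PORT A =====
-- `casefold` is ported as PySem.Str.lower (exact on the ASCII domain);
-- `isinstance(raw, str)` is always true under the List String typing.
def pvCapPartA (part : List Char) : List Char :=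
  if part ≠ [] then PySem.Chars.upper (part.take 1) ++ part.drop 1 else part

def pvCapLabelA (label : String) : String :=
  String.ofList (PySem.Chars.join [' '] ((PySem.Chars.splitOn label.toList [' ']).map pvCapPartA))

def build_entity_tail (canonical_names : List String) : String :=
  if canonical_names = [] then ""
  else
    let seen : PySem.Dict String String :=
      canonical_names.foldl (fun seen raw =>
        let name := PySem.Str.strip raw
        if name = "" then seen
        else
          let key := PySem.Str.lower name
          if seen.contains key then seen else seen.insert key name) PySem.Dict.empty
    if seen.items = [] then ""
    else
      let ordered := (PySem.List.sorted seen.values (fun s => PySem.Str.lower s)).take 12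
      let capitalized := ordered.map pvCapLabelA
      String.ofList ("[Entities: ".toList ++ PySem.Chars.join (", ".toList) (capitalized.map String.toList) ++ "]".toList)

-- ===== PORT B =====
def pvCapPartB (part : List Char) : List Char :=
  if part ≠ [] then PySem.Chars.upper (part.take 1) ++ part.drop 1 else part

def pvCapLabelB (label : String) : String :=
  String.ofList (PySem.Chars.join [' '] ((PySem.Chars.splitOn label.toList [' ']).map pvCapPartB))

def build_entity_tail_alt (canonical_names : List String) : String :=
  let names := canonical_names.foldl (fun acc raw =>
      let name := PySem.Str.strip raw
      if name = "" then acc else acc ++ [name]) []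
  if names = [] then ""
  else
    let sortedNames := PySem.List.sorted names (fun s => PySem.Str.lower s)
    let kept := (sortedNames.foldl (fun (st : List String × Option String) name =>
        let key := PySem.Str.lower name
        if st.2 ≠ some key then (st.1 ++ [name], some key) else st)
        (([] : List String), (none : Option String))).1
    let capitalized := (kept.take 12).map pvCapLabelB
    String.ofList ("[Entities: ".toList ++ PySem.Chars.join (", ".toList) (capitalized.map String.toList) ++ "]".toList)

-- ===== PRECONDITION & SPEC =====
def Spec_build_entity_tail (canonical_names : List String) (out : String) : Prop := out = build_entity_tail_alt canonical_names
instance (canonical_names : List String) (out : String) : Decidable (Spec_build_entity_tail canonical_names out) := by unfold Spec_build_entity_tail; infer_instance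

-- ===== CLAIM (what is proved, stated in full; the proofs are below) =====
def Claim_equal_build_entity_tail : Prop := ∀ (canonical_names : List String), Dom_build_entity_tail canonical_names → Spec_build_entity_tail canonical_names (build_entity_tail canonical_names)

-- ===== LEMMAS AND PROOFS =====

-- The filtered list of stripped, non-empty names (common backbone of both programs).
def pvL (cs : List String) : List String :=
  (cs.map PySem.Str.strip).filter (fun n => !(n == ""))

-- A's dedup step on the filtered list (keep first occurrence per lowered key).
def pvStepD (acc : List String) (n : String) : List String :=
  if acc.any (fun m => PySem.Str.lower m == PySem.Str.lower n) then acc else acc ++ [n]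

def pvDD (L : List String) : List String := L.foldl pvStepD []

-- B's adjacent dedup, recursively.
def pvAdj (prev : Option String) : List String → List String
  | [] => []
  | n :: t => if prev ≠ some (PySem.Str.lower n) then n :: pvAdj (some (PySem.Str.lower n)) t
              else pvAdj prev t

lemma pv_names_eq (cs : List String) (acc : List String) :
    cs.foldl (fun acc raw =>
      let name := PySem.Str.strip raw
      if name = "" then acc else acc ++ [name]) acc = acc ++ pvL cs := by
  induction cs generalizing acc with
  | nil => simp [pvL]
  | cons raw cs ih =>
    simp only [List.foldl_cons, pvL, List.map_cons, List.filter_cons]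
    by_cases h : PySem.Str.strip raw = ""
    · simp [h, ih, pvL]
    · simp [h, ih, pvL]

lemma pv_foldA (cs : List String) (R : List String) :
    (cs.foldl (fun seen raw =>
        let name := PySem.Str.strip raw
        if name = "" then seen
        else
          let key := PySem.Str.lower name
          if seen.contains key then seen else seen.insert key name)
      (PySem.Dict.mk (R.map (fun n => (PySem.Str.lower n, n))))).items
    = ((pvL cs).foldl pvStepD R).map (fun n => (PySem.Str.lower n, n)) := by
  induction cs generalizing R with
  | nil => simp [pvL]
  | cons raw cs ih =>
    simp only [List.foldl_cons, pvL, List.map_cons, List.filter_cons]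
    by_cases h : PySem.Str.strip raw = ""
    · simp only [h, if_pos rfl]
      simpa [pvL, h] using ih R
    · have hcont : (PySem.Dict.mk (R.map (fun n => (PySem.Str.lower n, n)))).contains
          (PySem.Str.lower (PySem.Str.strip raw))
          = R.any (fun m => PySem.Str.lower m == PySem.Str.lower (PySem.Str.strip raw)) := by
        simp [PySem.Dict.contains, List.any_map, Function.comp_def]
      by_cases hany : R.any (fun m => PySem.Str.lower m == PySem.Str.lower (PySem.Str.strip raw)) = true
      · simp only [h, if_neg h, hcont, hany, if_pos rfl]
        have := ih R
        simp only [pvL] at this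
        simp [this, h, pvStepD, hany]
      · simp only [h, if_neg h, hcont]
        rw [if_neg (by simp [hany])]
        have hins : (PySem.Dict.mk (R.map (fun n => (PySem.Str.lower n, n)))).insert
            (PySem.Str.lower (PySem.Str.strip raw)) (PySem.Str.strip raw)
            = PySem.Dict.mk ((R ++ [PySem.Str.strip raw]).map (fun n => (PySem.Str.lower n, n))) := by
          simp [PySem.Dict.insert, PySem.Dict.contains, List.any_map, Function.comp_def, hany]
        rw [hins]
        have := ih (R ++ [PySem.Str.strip raw])
        simp only [pvL] at this
        simpa [pvStepD, h, hany, List.map_append] using this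

lemma pv_dd_concat (L : List String) (x : String) : pvDD (L ++ [x]) = pvStepD (pvDD L) x := by
  simp [pvDD]

lemma pv_any_key (acc : List String) (x : String) :
    acc.any (fun m => PySem.Str.lower m == PySem.Str.lower x) = true
      ↔ PySem.Str.lower x ∈ acc.map PySem.Str.lower := by
  simp only [List.any_eq_true, beq_iff_eq, List.mem_map]

lemma pv_dd_keymem (L : List String) (c : String) :
    c ∈ (pvDD L).map PySem.Str.lower ↔ c ∈ L.map PySem.Str.lower := by
  induction L using List.reverseRecOn with
  | nil => simp [pvDD]
  | append_singleton L x ih =>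
    rw [pv_dd_concat]
    by_cases hany : (pvDD L).any (fun m => PySem.Str.lower m == PySem.Str.lower x) = true
    · have h1 : pvStepD (pvDD L) x = pvDD L := by simp [pvStepD, hany]
      rw [h1]
      have hx := (pv_any_key _ x).mp hany
      simp only [List.map_append, List.mem_append, List.map_cons, List.map_nil, List.mem_cons,
        List.not_mem_nil, or_false, ih]
      constructor
      · exact fun h => Or.inl h
      · rintro (h | h)
        · exact h
        · subst h; exact ih.mp hx
    · have h1 : pvStepD (pvDD L) x = pvDD L ++ [x] := by
        simp only [pvStepD]; rw [if_neg (by simp [hany])]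
      rw [h1]
      simp [ih]

lemma pv_dd_nodup (L : List String) : ((pvDD L).map PySem.Str.lower).Nodup := by
  induction L using List.reverseRecOn with
  | nil => simp [pvDD]
  | append_singleton L x ih =>
    rw [pv_dd_concat]
    by_cases hany : (pvDD L).any (fun m => PySem.Str.lower m == PySem.Str.lower x) = true
    · have h1 : pvStepD (pvDD L) x = pvDD L := by simp [pvStepD, hany]
      rw [h1]; exact ih
    · have hx : PySem.Str.lower x ∉ (pvDD L).map PySem.Str.lower := by
        intro h; exact hany ((pv_any_key _ x).mpr h)
      have h1 : pvStepD (pvDD L) x = pvDD L ++ [x] := by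
        simp only [pvStepD]; rw [if_neg (by simp [hany])]
      rw [h1, List.map_append]
      refine List.Nodup.append ih (by simp) ?_
      simp only [List.disjoint_singleton] at *
      simpa using hx

lemma pv_dd_find (L : List String) (c : String) :
    (pvDD L).find? (fun m => PySem.Str.lower m == c) = L.find? (fun m => PySem.Str.lower m == c) := by
  induction L using List.reverseRecOn with
  | nil => simp [pvDD]
  | append_singleton L x ih =>
    rw [pv_dd_concat, List.find?_append]
    by_cases hany : (pvDD L).any (fun m => PySem.Str.lower m == PySem.Str.lower x) = true
    · have h1 : pvStepD (pvDD L) x = pvDD L := by simp [pvStepD, hany]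
      rw [h1, ih]
      by_cases hc : PySem.Str.lower x = c
      · subst hc
        have hx := (pv_any_key _ x).mp hany
        have hmem : PySem.Str.lower x ∈ L.map PySem.Str.lower := (pv_dd_keymem L _).mp hx
        obtain ⟨m, hm, he⟩ := List.mem_map.mp hmem
        have hne : ¬ L.find? (fun m => PySem.Str.lower m == PySem.Str.lower x) = none := by
          intro hn
          exact (List.find?_eq_none.mp hn) m hm (by simp [he])
        obtain ⟨v, hv⟩ := Option.ne_none_iff_exists'.mp hne
        simp [hv]
      · have : (List.find? (fun m => PySem.Str.lower m == c) [x]) = none := by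
          simp [hc]
        simp [this]
    · have h1 : pvStepD (pvDD L) x = pvDD L ++ [x] := by
        simp only [pvStepD]; rw [if_neg (by simp [hany])]
      rw [h1, List.find?_append, ih]

lemma pv_dd_nil_iff (L : List String) : pvDD L = [] ↔ L = [] := by
  induction L using List.reverseRecOn with
  | nil => simp [pvDD]
  | append_singleton L x ih =>
    simp only [pv_dd_concat]
    constructor
    · intro h
      by_cases hany : (pvDD L).any (fun m => PySem.Str.lower m == PySem.Str.lower x) = true
      · have h1 : pvStepD (pvDD L) x = pvDD L := by simp [pvStepD, hany]
        rw [h1] at h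
        have := ih.mp h; subst this
        simp [pvDD, pvStepD] at hany
      · have h1 : pvStepD (pvDD L) x = pvDD L ++ [x] := by
          simp only [pvStepD]; rw [if_neg (by simp [hany])]
        rw [h1] at h; simp at h
    · intro h; simp at h

lemma pv_adj_foldl (S : List String) (acc : List String) (prev : Option String) :
    (S.foldl (fun (st : List String × Option String) name =>
        let key := PySem.Str.lower name
        if st.2 ≠ some key then (st.1 ++ [name], some key) else st) (acc, prev)).1
    = acc ++ pvAdj prev S := by
  induction S generalizing acc prev with
  | nil => simp [pvAdj]
  | cons n t ih =>
    simp only [List.foldl_cons, pvAdj]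
    by_cases h : prev ≠ some (PySem.Str.lower n)
    · rw [if_pos h, if_pos h, ih]
      simp
    · rw [if_neg h, if_neg h, ih]

lemma pv_adj_some (S : List String) (cp : String)
    (hS : S.Pairwise (fun a b => PySem.Str.lower a ≤ PySem.Str.lower b))
    (hcp : ∀ m ∈ S, cp ≤ PySem.Str.lower m) :
    (∀ m ∈ pvAdj (some cp) S, cp < PySem.Str.lower m) ∧
    (pvAdj (some cp) S).Pairwise (fun a b => PySem.Str.lower a < PySem.Str.lower b) ∧
    (∀ c, (pvAdj (some cp) S).find? (fun m => PySem.Str.lower m == c)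
        = if c = cp then none else S.find? (fun m => PySem.Str.lower m == c)) ∧
    (∀ c, c ∈ (pvAdj (some cp) S).map PySem.Str.lower ↔ c ≠ cp ∧ c ∈ S.map PySem.Str.lower) := by
  induction S generalizing cp with
  | nil => simp [pvAdj]
  | cons n t ih =>
    rw [List.pairwise_cons] at hS
    obtain ⟨hn, ht⟩ := hS
    by_cases h : PySem.Str.lower n = cp
    · -- skipped element
      have hne : ¬ ((some cp : Option String) ≠ some (PySem.Str.lower n)) := by simp [h]
      have hstep : pvAdj (some cp) (n :: t) = pvAdj (some cp) t := by
        simp only [pvAdj]; rw [if_neg hne]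
      obtain ⟨ih1, ih2, ih3, ih4⟩ := ih cp ht (fun m hm => h ▸ hn m hm)
      rw [hstep]
      refine ⟨ih1, ih2, ?_, ?_⟩
      · intro c
        rw [ih3 c]
        by_cases hc : c = cp
        · simp [hc]
        · rw [if_neg hc, if_neg hc]
          have : (PySem.Str.lower n == c) = false := by simp [h, hc, Ne.symm]
          simp [List.find?_cons, this]
      · intro c
        rw [ih4 c]
        constructor
        · rintro ⟨h1, h2⟩; exact ⟨h1, by simp [h2]⟩
        · rintro ⟨h1, h2⟩
          refine ⟨h1, ?_⟩
          simp only [List.map_cons, List.mem_cons] at h2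
          rcases h2 with h2 | h2
          · exact absurd (h2.trans h) h1
          · exact h2
    · -- kept element
      have hlt : cp < PySem.Str.lower n := lt_of_le_of_ne (hcp n (by simp)) (fun e => h e.symm)
      have hne : ((some cp : Option String) ≠ some (PySem.Str.lower n)) := by simp [h, Ne.symm]
      have hstep : pvAdj (some cp) (n :: t) = n :: pvAdj (some (PySem.Str.lower n)) t := by
        simp only [pvAdj]; rw [if_pos hne]
      obtain ⟨ih1, ih2, ih3, ih4⟩ := ih (PySem.Str.lower n) ht hn
      rw [hstep]
      refine ⟨?_, ?_, ?_, ?_⟩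
      · intro m hm
        rcases List.mem_cons.mp hm with hm | hm
        · subst hm; exact hlt
        · exact lt_trans hlt (ih1 m hm)
      · exact List.pairwise_cons.mpr ⟨fun m hm => ih1 m hm, ih2⟩
      · intro c
        by_cases hc : PySem.Str.lower n = c
        · subst hc
          have hccp : ¬ PySem.Str.lower n = cp := h
          simp [List.find?_cons, hccp]
        · have hb : (PySem.Str.lower n == c) = false := by simp [hc]
          have hLcons : List.find? (fun m => PySem.Str.lower m == c) (n :: pvAdj (some (PySem.Str.lower n)) t)
              = List.find? (fun m => PySem.Str.lower m == c) (pvAdj (some (PySem.Str.lower n)) t) := by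
            simp [List.find?_cons, hb]
          have hRcons : List.find? (fun m => PySem.Str.lower m == c) (n :: t)
              = List.find? (fun m => PySem.Str.lower m == c) t := by
            simp [List.find?_cons, hb]
          rw [hLcons, ih3 c, hRcons]
          by_cases hccp : c = cp
          · subst hccp
            have hnone : List.find? (fun m => PySem.Str.lower m == c) t = none :=
              List.find?_eq_none.mpr (fun m hm => by
                have hlt2 := lt_of_lt_of_le hlt (hn m hm)
                simp only [beq_iff_eq]
                intro e; rw [e] at hlt2; exact absurd hlt2 (lt_irrefl _))
            rw [if_neg (fun e => hc e.symm), if_pos rfl, hnone]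
          · rw [if_neg (fun e => hc e.symm), if_neg hccp]
      · intro c
        simp only [List.map_cons, List.mem_cons, ih4 c]
        constructor
        · rintro (rfl | ⟨h1, h2⟩)
          · exact ⟨fun e => h e, Or.inl rfl⟩
          · obtain ⟨m, hm, he⟩ := List.mem_map.mp h2
            have hcc : cp < c := he ▸ lt_of_lt_of_le hlt (hn m hm)
            exact ⟨ne_of_gt hcc, Or.inr h2⟩
        · rintro ⟨h1, rfl | h2⟩
          · exact Or.inl rfl
          · by_cases hcn : c = PySem.Str.lower n
            · exact Or.inl hcn
            · exact Or.inr ⟨hcn, h2⟩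

lemma pv_adj_none_cons (n : String) (t : List String) :
    pvAdj none (n :: t) = n :: pvAdj (some (PySem.Str.lower n)) t := by
  simp [pvAdj]

lemma pv_adj_none_pairwise (S : List String)
    (hS : S.Pairwise (fun a b => PySem.Str.lower a ≤ PySem.Str.lower b)) :
    (pvAdj none S).Pairwise (fun a b => PySem.Str.lower a < PySem.Str.lower b) := by
  cases S with
  | nil => simp [pvAdj]
  | cons n t =>
    rw [List.pairwise_cons] at hS
    obtain ⟨hn, ht⟩ := hS
    obtain ⟨h1, h2, _, _⟩ := pv_adj_some t (PySem.Str.lower n) ht hn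
    rw [pv_adj_none_cons]
    exact List.pairwise_cons.mpr ⟨fun m hm => h1 m hm, h2⟩

lemma pv_adj_none_find (S : List String)
    (hS : S.Pairwise (fun a b => PySem.Str.lower a ≤ PySem.Str.lower b)) (c : String) :
    (pvAdj none S).find? (fun m => PySem.Str.lower m == c) = S.find? (fun m => PySem.Str.lower m == c) := by
  cases S with
  | nil => simp [pvAdj]
  | cons n t =>
    rw [List.pairwise_cons] at hS
    obtain ⟨hn, ht⟩ := hS
    obtain ⟨_, _, h3, _⟩ := pv_adj_some t (PySem.Str.lower n) ht hn
    rw [pv_adj_none_cons]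
    by_cases hc : PySem.Str.lower n = c
    · simp [List.find?_cons, hc]
    · have hb : (PySem.Str.lower n == c) = false := by simp [hc]
      have hL : List.find? (fun m => PySem.Str.lower m == c) (n :: pvAdj (some (PySem.Str.lower n)) t)
          = List.find? (fun m => PySem.Str.lower m == c) (pvAdj (some (PySem.Str.lower n)) t) := by
        simp [List.find?_cons, hb]
      have hR : List.find? (fun m => PySem.Str.lower m == c) (n :: t)
          = List.find? (fun m => PySem.Str.lower m == c) t := by
        simp [List.find?_cons, hb]
      rw [hL, hR, h3 c, if_neg (fun e => hc e.symm)]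

lemma pv_adj_none_keymem (S : List String)
    (hS : S.Pairwise (fun a b => PySem.Str.lower a ≤ PySem.Str.lower b)) (c : String) :
    c ∈ (pvAdj none S).map PySem.Str.lower ↔ c ∈ S.map PySem.Str.lower := by
  cases S with
  | nil => simp [pvAdj]
  | cons n t =>
    rw [List.pairwise_cons] at hS
    obtain ⟨hn, ht⟩ := hS
    obtain ⟨_, _, _, h4⟩ := pv_adj_some t (PySem.Str.lower n) ht hn
    rw [pv_adj_none_cons]
    simp only [List.map_cons, List.mem_cons, h4 c]
    constructor
    · rintro (rfl | ⟨h1, h2⟩)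
      · exact Or.inl rfl
      · exact Or.inr h2
    · rintro (rfl | h2)
      · exact Or.inl rfl
      · by_cases hcn : c = PySem.Str.lower n
        · exact Or.inl hcn
        · exact Or.inr ⟨hcn, h2⟩

lemma pv_insertBy_find_of_false (b : String → String → Bool) (p : String → Bool) (x : String)
    (ys : List String) (hx : p x = false) :
    (PySem.List.insertBy b x ys).find? p = ys.find? p := by
  induction ys with
  | nil => simp [PySem.List.insertBy, List.find?_cons, hx]
  | cons y t ih =>
    simp only [PySem.List.insertBy]
    by_cases hb : b x y = true
    · rw [if_pos hb]
      simp [List.find?_cons, hx]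
    · rw [if_neg hb]
      by_cases hp : p y = true
      · simp [List.find?_cons, hp]
      · simp only [List.find?_cons]
        simp only [Bool.not_eq_true] at hp
        simp [hp, ih]

lemma pv_insertBy_find_self (x : String) (ys : List String)
    (hys : ys.Pairwise (fun a b => PySem.Str.lower a ≤ PySem.Str.lower b)) :
    (PySem.List.insertBy (fun a b => decide (PySem.Str.lower a < PySem.Str.lower b)) x ys).find?
        (fun m => PySem.Str.lower m == PySem.Str.lower x)
      = (ys.find? (fun m => PySem.Str.lower m == PySem.Str.lower x)).or (some x) := by
  induction ys with
  | nil => simp [PySem.List.insertBy, List.find?_cons]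
  | cons y t ih =>
    rw [List.pairwise_cons] at hys
    obtain ⟨hy, ht⟩ := hys
    simp only [PySem.List.insertBy]
    by_cases hb : PySem.Str.lower x < PySem.Str.lower y
    · rw [if_pos (by simpa using hb)]
      have hpy : (PySem.Str.lower y == PySem.Str.lower x) = false := by
        simp only [beq_eq_false_iff_ne, ne_eq]
        intro e; rw [e] at hb; exact absurd hb (lt_irrefl _)
      have htnone : List.find? (fun m => PySem.Str.lower m == PySem.Str.lower x) t = none := by
        apply List.find?_eq_none.mpr
        intro m hm
        have := lt_of_lt_of_le hb (hy m hm)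
        simp only [beq_iff_eq]
        intro e; rw [e] at this; exact absurd this (lt_irrefl _)
      simp [List.find?_cons, hpy, htnone]
    · rw [if_neg (by simpa using hb)]
      by_cases hp : (PySem.Str.lower y == PySem.Str.lower x) = true
      · simp [List.find?_cons, hp]
      · simp only [Bool.not_eq_true] at hp
        rw [List.find?_cons_of_neg (by simp [hp]), List.find?_cons_of_neg (by simp [hp]), ih ht]

lemma pv_sorted_concat (L : List String) (x : String) :
    PySem.List.sorted (L ++ [x]) (fun s => PySem.Str.lower s)
      = PySem.List.insertBy (fun a b => decide (PySem.Str.lower a < PySem.Str.lower b)) x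
          (PySem.List.sorted L (fun s => PySem.Str.lower s)) := by
  rw [PySem.List.sorted_eq_foldl_insertBy, PySem.List.sorted_eq_foldl_insertBy, List.foldl_concat]

lemma pv_sorted_find (L : List String) (c : String) :
    (PySem.List.sorted L (fun s => PySem.Str.lower s)).find? (fun m => PySem.Str.lower m == c)
      = L.find? (fun m => PySem.Str.lower m == c) := by
  induction L using List.reverseRecOn with
  | nil => simp [PySem.List.sorted]
  | append_singleton L x ih =>
    rw [pv_sorted_concat, List.find?_append]
    by_cases hc : PySem.Str.lower x = c
    · subst hc
      rw [pv_insertBy_find_self x (PySem.List.sorted L (fun s => PySem.Str.lower s))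
        (PySem.List.sorted_pairwise L _), ih]
      have : List.find? (fun m => PySem.Str.lower m == PySem.Str.lower x) [x] = some x := by
        simp [List.find?_cons]
      rw [this]
    · have hx : (fun m => PySem.Str.lower m == c) x = false := by simp [hc]
      rw [pv_insertBy_find_of_false (fun a b => decide (PySem.Str.lower a < PySem.Str.lower b)) (fun m => PySem.Str.lower m == c) x (PySem.List.sorted L (fun s => PySem.Str.lower s)) hx, ih]
      have : List.find? (fun m => PySem.Str.lower m == c) [x] = none := by
        simp [List.find?_cons, hc]
      simp [this]

lemma pv_find_self_of_nodup (T : List String) (x : String)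
    (hT : (T.map PySem.Str.lower).Nodup) (hx : x ∈ T) :
    T.find? (fun m => PySem.Str.lower m == PySem.Str.lower x) = some x := by
  induction T with
  | nil => simp at hx
  | cons y t ih =>
    simp only [List.map_cons, List.nodup_cons] at hT
    obtain ⟨hy, ht⟩ := hT
    rcases List.mem_cons.mp hx with rfl | hx
    · simp [List.find?_cons]
    · have hne : (PySem.Str.lower y == PySem.Str.lower x) = false := by
        simp only [beq_eq_false_iff_ne, ne_eq]
        intro e
        exact hy (e ▸ List.mem_map.mpr ⟨x, hx, rfl⟩)
      rw [List.find?_cons_of_neg (by simp [hne]), ih ht hx]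

-- A list with distinct keys whose per-key first elements agree with L's is determined by its key list.
lemma pv_eq_map_g (L T : List String) (hT : (T.map PySem.Str.lower).Nodup)
    (hfind : ∀ c, T.find? (fun m => PySem.Str.lower m == c) = L.find? (fun m => PySem.Str.lower m == c)) :
    T = (T.map PySem.Str.lower).map
        (fun c => (L.find? (fun m => PySem.Str.lower m == c)).getD "") := by
  rw [List.map_map]
  have : ∀ x ∈ T, (L.find? (fun m => PySem.Str.lower m == PySem.Str.lower x)).getD "" = x := by
    intro x hx
    rw [← hfind, pv_find_self_of_nodup T x hT hx]
    rfl
  calc T = T.map id := (List.map_id T).symm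
    _ = T.map ((fun c => (L.find? (fun m => PySem.Str.lower m == c)).getD "") ∘ PySem.Str.lower) := by
        apply List.map_congr_left
        intro x hx
        exact (this x hx).symm

-- the central identity
lemma pv_main (L : List String) :
    PySem.List.sorted (pvDD L) (fun s => PySem.Str.lower s)
      = pvAdj none (PySem.List.sorted L (fun s => PySem.Str.lower s)) := by
  have hpw : (PySem.List.sorted L (fun s => PySem.Str.lower s)).Pairwise
      (fun a b => PySem.Str.lower a ≤ PySem.Str.lower b) := PySem.List.sorted_pairwise L _
  have hT2pw := pv_adj_none_pairwise _ hpw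
  have hT2nodup : ((pvAdj none (PySem.List.sorted L (fun s => PySem.Str.lower s))).map PySem.Str.lower).Nodup :=
    List.pairwise_map.mpr (hT2pw.imp (fun h => ne_of_lt h))
  have hT2find : ∀ c, (pvAdj none (PySem.List.sorted L (fun s => PySem.Str.lower s))).find?
      (fun m => PySem.Str.lower m == c) = L.find? (fun m => PySem.Str.lower m == c) :=
    fun c => (pv_adj_none_find _ hpw c).trans (pv_sorted_find L c)
  have hkeymem : ∀ c, c ∈ (pvAdj none (PySem.List.sorted L (fun s => PySem.Str.lower s))).map PySem.Str.lower
      ↔ c ∈ (pvDD L).map PySem.Str.lower := by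
    intro c
    rw [pv_adj_none_keymem _ hpw c, pv_dd_keymem L c]
    exact ((PySem.List.sorted_perm L (fun s => PySem.Str.lower s) false).map PySem.Str.lower).mem_iff
  have hkeyperm : ((pvAdj none (PySem.List.sorted L (fun s => PySem.Str.lower s))).map PySem.Str.lower).Perm
      ((pvDD L).map PySem.Str.lower) :=
    (List.perm_ext_iff_of_nodup hT2nodup (pv_dd_nodup L)).mpr hkeymem
  have hperm : (pvAdj none (PySem.List.sorted L (fun s => PySem.Str.lower s))).Perm (pvDD L) := by
    rw [pv_eq_map_g L _ hT2nodup hT2find, pv_eq_map_g L (pvDD L) (pv_dd_nodup L) (pv_dd_find L)]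
    exact hkeyperm.map _
  exact PySem.List.sorted_eq_of_perm_of_pairwise_lt (pvDD L) _ _ hperm hT2pw

lemma pv_cap_eq : pvCapLabelA = pvCapLabelB := by
  funext l; rfl

-- ===== VERDICT (by name: the statement is the Claim_ definition above) =====
theorem build_entity_tail_spec : Claim_equal_build_entity_tail := by
  unfold Claim_equal_build_entity_tail
  intro cs _
  unfold Spec_build_entity_tail
  simp only [build_entity_tail, build_entity_tail_alt]
  rw [pv_names_eq cs []]
  simp only [List.nil_append]
  have hD : (cs.foldl (fun seen raw =>
        let name := PySem.Str.strip raw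
        if name = "" then seen
        else
          let key := PySem.Str.lower name
          if seen.contains key then seen else seen.insert key name)
      (PySem.Dict.empty : PySem.Dict String String))
      = PySem.Dict.mk ((pvDD (pvL cs)).map (fun n => (PySem.Str.lower n, n))) := by
    apply PySem.Dict.ext
    simpa [pvDD] using pv_foldA cs []
  rw [hD]
  by_cases hcs : cs = []
  · subst hcs
    have h0 : pvL ([] : List String) = [] := rfl
    rw [h0]
    simp [pvDD]
  · rw [if_neg hcs]
    by_cases hL : pvL cs = []
    · rw [hL]
      have h1 : pvDD ([] : List String) = [] := rfl
      rw [h1]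
      simp
    · rw [if_neg hL]
      have hdd : pvDD (pvL cs) ≠ [] := fun h => hL ((pv_dd_nil_iff (pvL cs)).mp h)
      rw [if_neg (by simpa using hdd)]
      have hkept := pv_adj_foldl (PySem.List.sorted (pvL cs) (fun s => PySem.Str.lower s)) [] none
      rw [hkept]
      have hvals : PySem.Dict.values (PySem.Dict.mk ((pvDD (pvL cs)).map (fun n => (PySem.Str.lower n, n))))
          = pvDD (pvL cs) := by
        simp [PySem.Dict.values, List.map_map, Function.comp_def]
      rw [hvals, pv_main (pvL cs)]
      simp only [List.nil_append, pv_cap_eq]
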